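-- pv_equiv track=rewrite | github.com/habibcilmd-cardiologist/dr-cil | scripts/migrate_faq.py | remove_faq_shortcodes
-- ===== SOURCE A (Python) =====
-- def remove_faq_shortcodes(content: str) -> str:
--     """Remove all FAQ shortcodes and replace with faq-list shortcode."""
--     # Find the section containing FAQs
--     lines = content.split('\n')
--     new_lines = []
--     in_faq_section = False
--     faq_section_replaced = False
--
--     i = 0
--     while i < len(lines):
--         line = lines[i]
--
--         # Check if this line starts a FAQ shortcode
--         if '{{< faq question=' in line or '{{<faq question=' in line:
--             if not faq_section_replaced:
--                 # Add the faq-list shortcode only once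
--                 new_lines.append('{{< faq-list >}}')
--                 new_lines.append('')
--                 faq_section_replaced = True
--
--             # Skip until we find the closing tag
--             while i < len(lines) and '{{< /faq >}}' not in lines[i] and '{{</faq>}}' not in lines[i]:
--                 i += 1
--             i += 1  # Skip the closing tag line
--
--             # Skip any empty lines after the FAQ
--             while i < len(lines) and lines[i].strip() == '':
--                 i += 1
--         else:
--             new_lines.append(line)
--             i += 1
--
--     return '\n'.join(new_lines)
-- ===== SOURCE B (Python) =====
-- def remove_faq_shortcodes(content: str) -> str:
--     """Remove all FAQ shortcodes and replace with faq-list shortcode."""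
--     NORMAL, SKIPPING_FAQ, SKIPPING_BLANKS = 0, 1, 2
--     out = []
--     mode = NORMAL
--     replaced = False
--     for line in content.split('\n'):
--         if mode == SKIPPING_FAQ:
--             if '{{< /faq >}}' in line or '{{</faq>}}' in line:
--                 mode = SKIPPING_BLANKS
--             continue
--         if mode == SKIPPING_BLANKS:
--             if line.strip() == '':
--                 continue
--             mode = NORMAL
--         # NORMAL
--         if '{{< faq question=' in line or '{{<faq question=' in line:
--             if not replaced:
--                 out.append('{{< faq-list >}}')
--                 out.append('')
--                 replaced = True
--             if '{{< /faq >}}' in line or '{{</faq>}}' in line: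
--                 mode = SKIPPING_BLANKS
--             else:
--                 mode = SKIPPING_FAQ
--         else:
--             out.append(line)
--     return '\n'.join(out)
-- ===== Notes on version B (the rewrite author's own statement) =====
-- stated objective: alternative
-- what changed: Replaces A's index-advancing outer while loop with two nested skip-ahead while loops by a single for-each pass over the lines driven by an explicit state machine (NORMAL / SKIPPING_FAQ / SKIPPING_BLANKS) folded over an accumulator.
import Mathlib
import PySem

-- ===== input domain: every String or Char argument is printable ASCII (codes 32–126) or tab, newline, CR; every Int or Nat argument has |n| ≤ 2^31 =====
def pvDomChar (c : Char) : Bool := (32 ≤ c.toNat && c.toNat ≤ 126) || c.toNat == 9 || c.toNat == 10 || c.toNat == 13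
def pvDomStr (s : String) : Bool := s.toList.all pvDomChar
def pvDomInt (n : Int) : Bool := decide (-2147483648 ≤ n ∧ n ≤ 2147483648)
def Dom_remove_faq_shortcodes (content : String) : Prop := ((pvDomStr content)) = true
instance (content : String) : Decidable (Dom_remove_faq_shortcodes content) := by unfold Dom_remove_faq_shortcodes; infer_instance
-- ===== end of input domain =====

-- B replaces A's index-advancing outer/inner while loops by a single foldl pass with an
-- explicit mode state (normal / skipping-faq / skipping-blanks); objective: alternative.

-- ===== PORT A =====
def pvHasStart (line : String) : Bool :=
  PySem.Str.isIn "{{< faq question=" line || PySem.Str.isIn "{{<faq question=" line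

def pvHasClose (line : String) : Bool :=
  PySem.Str.isIn "{{< /faq >}}" line || PySem.Str.isIn "{{</faq>}}" line

-- A's inner while loop: skip until a line containing the closing tag, then skip that line too
def pvSkipClose : List String → List String
  | [] => []
  | l :: ls => if pvHasClose l then ls else pvSkipClose ls

-- A's second inner while loop: skip whitespace-only lines
def pvSkipBlanks : List String → List String
  | [] => []
  | l :: ls => if PySem.Str.strip l == "" then pvSkipBlanks ls else l :: ls

theorem pvSkipClose_len : ∀ ls : List String, (pvSkipClose ls).length ≤ ls.length := by
  intro ls; induction ls with
  | nil => simp [pvSkipClose]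
  | cons l ls ih =>
    simp only [pvSkipClose]
    split
    · simp
    · simpa using Nat.le_succ_of_le ih

theorem pvSkipBlanks_len : ∀ ls : List String, (pvSkipBlanks ls).length ≤ ls.length := by
  intro ls; induction ls with
  | nil => simp [pvSkipBlanks]
  | cons l ls ih =>
    simp only [pvSkipBlanks]
    split
    · simpa using Nat.le_succ_of_le ih
    · simp

-- A's outer while loop over the remaining lines, with the faq_section_replaced flag
def pvGoA : List String → Bool → List String
  | [], _ => []
  | line :: ls, replaced =>
    if pvHasStart line then
      (if !replaced then ["{{< faq-list >}}", ""] else []) ++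
        pvGoA (pvSkipBlanks (pvSkipClose (line :: ls))) true
    else
      line :: pvGoA ls replaced
termination_by ls _ => ls.length
decreasing_by
  all_goals simp only [List.length_cons]
  · have h1 : (pvSkipClose (line :: ls)).length ≤ ls.length := by
      simp only [pvSkipClose]; split
      · exact le_refl _
      · exact pvSkipClose_len ls
    have h2 := pvSkipBlanks_len (pvSkipClose (line :: ls))
    omega
  · omega

def remove_faq_shortcodes (content : String) : String :=
  PySem.Str.join "\n" (pvGoA (((PySem.Chars.splitOn content.toList "\n".toList).map String.ofList)) false)

-- ===== PORT B =====
inductive PvMode | normal | skipFaq | skipBlanks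
deriving DecidableEq, Repr

-- one NORMAL-mode iteration of B's for loop
def pvNormalStep (out : List String) (line : String) (replaced : Bool) :
    List String × PvMode × Bool :=
  if pvHasStart line then
    let out' := if !replaced then out ++ ["{{< faq-list >}}", ""] else out
    if pvHasClose line then (out', PvMode.skipBlanks, true) else (out', PvMode.skipFaq, true)
  else (out ++ [line], PvMode.normal, replaced)

-- one iteration of B's for loop (state = accumulated lines, mode, replaced flag)
def pvStepB (st : List String × PvMode × Bool) (line : String) : List String × PvMode × Bool :=
  match st with
  | (out, PvMode.skipFaq, replaced) =>
      if pvHasClose line then (out, PvMode.skipBlanks, replaced) else (out, PvMode.skipFaq, replaced)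
  | (out, PvMode.skipBlanks, replaced) =>
      if PySem.Str.strip line == "" then (out, PvMode.skipBlanks, replaced)
      else pvNormalStep out line replaced
  | (out, PvMode.normal, replaced) => pvNormalStep out line replaced

def remove_faq_shortcodes_alt (content : String) : String :=
  PySem.Str.join "\n"
    ((((PySem.Chars.splitOn content.toList "\n".toList).map String.ofList)).foldl pvStepB ([], PvMode.normal, false)).1

-- ===== PRECONDITION & SPEC =====
def Spec_remove_faq_shortcodes (content : String) (out : String) : Prop := out = remove_faq_shortcodes_alt content
instance (content : String) (out : String) : Decidable (Spec_remove_faq_shortcodes content out) := by unfold Spec_remove_faq_shortcodes; infer_instance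

-- ===== CLAIM (what is proved, stated in full; the proofs are below) =====
def Claim_equal_remove_faq_shortcodes : Prop := ∀ (content : String), Dom_remove_faq_shortcodes content → Spec_remove_faq_shortcodes content (remove_faq_shortcodes content)

-- ===== LEMMAS AND PROOFS =====

-- recursive characterisation of B's fold (lines still to process, mode, flag ↦ lines emitted)
def pvBRun : List String → PvMode → Bool → List String
  | [], _, _ => []
  | line :: ls, m, r =>
    match m with
    | PvMode.skipFaq =>
        pvBRun ls (if pvHasClose line then PvMode.skipBlanks else PvMode.skipFaq) r
    | PvMode.skipBlanks =>
        if PySem.Str.strip line == "" then pvBRun ls PvMode.skipBlanks r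
        else if pvHasStart line then
          (if !r then ["{{< faq-list >}}", ""] else []) ++
            pvBRun ls (if pvHasClose line then PvMode.skipBlanks else PvMode.skipFaq) true
        else line :: pvBRun ls PvMode.normal r
    | PvMode.normal =>
        if pvHasStart line then
          (if !r then ["{{< faq-list >}}", ""] else []) ++
            pvBRun ls (if pvHasClose line then PvMode.skipBlanks else PvMode.skipFaq) true
        else line :: pvBRun ls PvMode.normal r

theorem pvFoldB_eq : ∀ (ls : List String) (out : List String) (m : PvMode) (r : Bool),
    (ls.foldl pvStepB (out, m, r)).1 = out ++ pvBRun ls m r := by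
  intro ls
  induction ls with
  | nil => intro out m r; simp [pvBRun]
  | cons line ls ih =>
    intro out m r
    cases m <;> simp only [List.foldl_cons, pvStepB, pvBRun, pvNormalStep] <;>
      split_ifs <;> simp [ih, List.append_assoc]

theorem pvBRun_skipFaq : ∀ (ls : List String) (r : Bool),
    pvBRun ls PvMode.skipFaq r = pvBRun (pvSkipClose ls) PvMode.skipBlanks r := by
  intro ls
  induction ls with
  | nil => intro r; simp [pvBRun, pvSkipClose]
  | cons line ls ih =>
    intro r
    simp only [pvBRun, pvSkipClose]
    by_cases h : pvHasClose line = true <;> simp [h, ih]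

theorem pvBRun_skipBlanks : ∀ (ls : List String) (r : Bool),
    pvBRun ls PvMode.skipBlanks r = pvBRun (pvSkipBlanks ls) PvMode.normal r := by
  intro ls
  induction ls with
  | nil => intro r; simp [pvBRun, pvSkipBlanks]
  | cons line ls ih =>
    intro r
    simp only [pvBRun, pvSkipBlanks]
    by_cases h : (PySem.Str.strip line == "") = true <;> simp [h, ih, pvBRun]

theorem pvGoA_eq_pvBRun_aux : ∀ (n : Nat) (ls : List String), ls.length ≤ n → ∀ (r : Bool),
    pvGoA ls r = pvBRun ls PvMode.normal r := by
  intro n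
  induction n with
  | zero =>
    intro ls h r
    have : ls = [] := List.eq_nil_of_length_eq_zero (Nat.le_zero.mp h)
    subst this; simp [pvGoA, pvBRun]
  | succ n ih =>
    intro ls h r
    cases ls with
    | nil => simp [pvGoA, pvBRun]
    | cons line ls =>
      simp only [pvGoA, pvBRun]
      by_cases hs : pvHasStart line = true
      · simp only [hs, if_true]
        have hc1 : (pvSkipClose (line :: ls)).length ≤ ls.length := by
          simp only [pvSkipClose]; split
          · exact le_refl _
          · exact pvSkipClose_len ls
        have hlen : (pvSkipBlanks (pvSkipClose (line :: ls))).length ≤ n := by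
          have := pvSkipBlanks_len (pvSkipClose (line :: ls))
          simp only [List.length_cons] at h; omega
        rw [ih _ hlen true]
        congr 1
        by_cases hc : pvHasClose line = true
        · simp [hc, pvSkipClose, pvBRun_skipBlanks]
        · simp only [pvSkipClose, hc, if_false, Bool.false_eq_true]
          simp [pvBRun_skipFaq, pvBRun_skipBlanks]
      · simp only [hs, Bool.false_eq_true, if_false]
        have hlen : ls.length ≤ n := by simp only [List.length_cons] at h; omega
        rw [ih _ hlen r]

-- ===== VERDICT (by name: the statement is the Claim_ definition above) =====
theorem remove_faq_shortcodes_spec : Claim_equal_remove_faq_shortcodes := by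
  unfold Claim_equal_remove_faq_shortcodes Spec_remove_faq_shortcodes
  intro content _
  unfold remove_faq_shortcodes remove_faq_shortcodes_alt
  rw [pvFoldB_eq, pvGoA_eq_pvBRun_aux (((PySem.Chars.splitOn content.toList "\n".toList).map String.ofList)).length _ (le_refl _)]
  simp
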